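-- pv_equiv track=rewrite | github.com/network-audit/network-audit-collector | network_audit/commands/windows.py | _parse_caption
-- ===== SOURCE A (Python) =====
-- def _parse_caption(caption):
--     """Parse Caption into (product, edition).
--
--     Examples:
--         'Microsoft Windows 10 Pro'                   → ('Windows 10', 'Pro')
--         'Microsoft Windows 11 Enterprise'             → ('Windows 11', 'Enterprise')
--         'Microsoft Windows Server 2022 Standard'      → ('Windows Server 2022', 'Standard')
--         'Microsoft Windows Server 2019 Datacenter'    → ('Windows Server 2019', 'Datacenter')
--     """
--     name = caption.replace("Microsoft ", "").strip()
--
--     if "Windows Server" in name: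
--         parts = name.split()
--         for i, p in enumerate(parts):
--             if p == "Server" and i + 1 < len(parts):
--                 year = parts[i + 1]
--                 product = f"Windows Server {year}"
--                 edition = " ".join(parts[i + 2:])
--                 return product, edition
--         return name, ""
--
--     if "Windows" in name:
--         parts = name.split()
--         for i, p in enumerate(parts):
--             if p == "Windows" and i + 1 < len(parts):
--                 ver = parts[i + 1]
--                 if ver.isdigit() or ver in ("XP", "Vista"):
--                     product = f"Windows {ver}"
--                     edition = " ".join(parts[i + 2:])
--                     return product, edition
--         return "Windows", ""
--
--     return name, ""
-- ===== SOURCE B (Python) =====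
-- def _scan_server(ts):
--     match ts:
--         case ["Server", year, *rest]:
--             return "Windows Server " + year, " ".join(rest)
--         case [_, *rest]:
--             return _scan_server(rest)
--         case []:
--             return None
--
--
-- def _scan_client(ts):
--     match ts:
--         case ["Windows", ver, *rest] if ver.isdigit() or ver in ("XP", "Vista"):
--             return "Windows " + ver, " ".join(rest)
--         case [_, *rest]:
--             return _scan_client(rest)
--         case []:
--             return None
--
--
-- def _parse_caption(caption):
--     name = caption.replace("Microsoft ", "").strip()
--     if "Windows Server" in name:
--         return _scan_server(name.split()) or (name, "")
--     if "Windows" in name: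
--         return _scan_client(name.split()) or ("Windows", "")
--     return name, ""
-- ===== Notes on version B (the rewrite author's own statement) =====
-- stated objective: idiomatic
-- what changed: Replaces A's two index-based enumerate loops (with i+1 bound checks, parts[i+1] indexing and parts[i+2:] slicing) by structural pattern matching on the token list with recursion on the tail, so no indices, bound checks or slices appear at all.
import Mathlib
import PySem

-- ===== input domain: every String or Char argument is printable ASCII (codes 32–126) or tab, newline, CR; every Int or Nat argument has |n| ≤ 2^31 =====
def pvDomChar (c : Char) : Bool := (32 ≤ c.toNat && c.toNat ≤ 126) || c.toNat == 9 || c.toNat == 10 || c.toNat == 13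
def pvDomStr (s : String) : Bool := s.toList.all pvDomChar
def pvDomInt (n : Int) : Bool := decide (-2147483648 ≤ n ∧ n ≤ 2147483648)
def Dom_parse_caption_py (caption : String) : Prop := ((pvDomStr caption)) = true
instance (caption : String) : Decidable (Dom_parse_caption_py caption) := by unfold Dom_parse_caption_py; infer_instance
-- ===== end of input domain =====

-- B replaces A's index-based enumerate loops by direct structural pattern matching on the
-- token list (idiomatic; no indices, bound checks or slices). Return values are identical.

-- ===== PORT A =====
-- A's server-branch loop: 'for i, p in enumerate(parts): if p == "Server" and i+1 < len(parts): …'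
def pyA_serverLoop (parts : List String) : List (Int × String) → Option (String × String)
  | [] => none
  | (i, p) :: rest =>
    if p = "Server" ∧ i + 1 < (parts.length : Int) then
      some ("Windows Server " ++ PySem.List.pyGetD parts (i + 1) "",
            PySem.Str.join " " (PySem.List.slice parts (some (i + 2)) none))
    else pyA_serverLoop parts rest

-- A's client-branch loop: 'for i, p in enumerate(parts): if p == "Windows" and i+1 < len(parts): ver = parts[i+1]; if ver.isdigit() or ver in ("XP","Vista"): …'
def pyA_clientLoop (parts : List String) : List (Int × String) → Option (String × String)
  | [] => none
  | (i, p) :: rest =>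
    if p = "Windows" ∧ i + 1 < (parts.length : Int) then
      let ver := PySem.List.pyGetD parts (i + 1) ""
      if PySem.Str.strIsdigit ver || ver = "XP" || ver = "Vista" then
        some ("Windows " ++ ver,
              PySem.Str.join " " (PySem.List.slice parts (some (i + 2)) none))
      else pyA_clientLoop parts rest
    else pyA_clientLoop parts rest

def parse_caption_py (caption : String) : String × String :=
  let name := PySem.Str.strip (PySem.Str.replace caption "Microsoft " "")
  if PySem.Str.isIn "Windows Server" name then
    let parts := PySem.Str.split₀ name
    match pyA_serverLoop parts (PySem.List.enumerate parts 0) with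
    | some r => r
    | none => (name, "")
  else if PySem.Str.isIn "Windows" name then
    let parts := PySem.Str.split₀ name
    match pyA_clientLoop parts (PySem.List.enumerate parts 0) with
    | some r => r
    | none => ("Windows", "")
  else (name, "")

-- ===== PORT B =====
-- Source B's _scan_server: structural match on the token list
def altScanServer : List String → Option (String × String)
  | "Server" :: year :: rest => some ("Windows Server " ++ year, PySem.Str.join " " rest)
  | _ :: rest => altScanServer rest
  | [] => none

-- Source B's _scan_client: structural match with the version guard
def altScanClient : List String → Option (String × String)
  | "Windows" :: ver :: rest =>
    if PySem.Str.strIsdigit ver || ver = "XP" || ver = "Vista" then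
      some ("Windows " ++ ver, PySem.Str.join " " rest)
    else altScanClient (ver :: rest)
  | _ :: rest => altScanClient rest
  | [] => none

def parse_caption_py_alt (caption : String) : String × String :=
  let name := PySem.Str.strip (PySem.Str.replace caption "Microsoft " "")
  if PySem.Str.isIn "Windows Server" name then
    (altScanServer (PySem.Str.split₀ name)).getD (name, "")
  else if PySem.Str.isIn "Windows" name then
    (altScanClient (PySem.Str.split₀ name)).getD ("Windows", "")
  else (name, "")

-- ===== PRECONDITION & SPEC =====
def Spec_parse_caption_py (caption : String) (out : String × String) : Prop := out = parse_caption_py_alt caption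
instance (caption : String) (out : String × String) : Decidable (Spec_parse_caption_py caption out) := by unfold Spec_parse_caption_py; infer_instance

-- ===== CLAIM (what is proved, stated in full; the proofs are below) =====
def Claim_equal_parse_caption_py : Prop := ∀ (caption : String), Dom_parse_caption_py caption → Spec_parse_caption_py caption (parse_caption_py caption)

-- ===== LEMMAS AND PROOFS =====
theorem altScanServer_cons_ne (p : String) (l : List String) (h : p ≠ "Server") :
    altScanServer (p :: l) = altScanServer l :=
  altScanServer.eq_2 p l (fun _ _ hp _ => h hp)

theorem altScanServer_single : altScanServer ["Server"] = none := by
  rw [altScanServer.eq_2 "Server" [] (by intro y r _ h; cases h)]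
  rfl

theorem altScanClient_cons_ne (p : String) (l : List String) (h : p ≠ "Windows") :
    altScanClient (p :: l) = altScanClient l :=
  altScanClient.eq_2 p l (fun _ _ hp _ => h hp)

theorem altScanClient_single : altScanClient ["Windows"] = none := by
  rw [altScanClient.eq_2 "Windows" [] (by intro y r _ h; cases h)]
  rfl

theorem pyGetD_at_len (P l : List String) (y : String) :
    PySem.List.pyGetD (P ++ y :: l) ((P.length : Nat) : Int) "" = y := by
  rw [PySem.List.pyGetD_natCast]
  simp [List.getD]

theorem slice_after (P l : List String) (y : String) :
    PySem.List.slice (P ++ y :: l) (some (((P.length : Nat) : Int) + 1)) = l := by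
  have h : PySem.List.slice (P ++ y :: l) (some (((P.length : Nat) : Int) + 1))
      = (P ++ y :: l).drop (((P.length : Nat) : Int) + 1).toNat := PySem.List.slice_from _ (by omega)
  have h2 : (((P.length : Nat) : Int) + 1).toNat = P.length + 1 := by omega
  rw [h, h2]
  exact List.drop_length_add_append (l₁ := P) (l₂ := y :: l) 1

theorem serverLoop_eq (suf : List String) : ∀ (pre : List String),
    pyA_serverLoop (pre ++ suf) (PySem.List.enumerate suf ((pre.length : Nat) : Int)) = altScanServer suf := by
  induction suf with
  | nil => intro pre; simp [PySem.List.enumerate, pyA_serverLoop, altScanServer]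
  | cons p rest ih =>
    intro pre
    rw [PySem.List.enumerate_cons]
    by_cases hp : p = "Server"
    · subst hp
      cases rest with
      | nil =>
        rw [PySem.List.enumerate_nil]
        have hno : ¬ (("Server" : String) = "Server" ∧ ((pre.length : Nat) : Int) + 1 < (((pre ++ ["Server"]).length : Nat) : Int)) := by
          intro h
          have := h.2
          simp at this
        simp only [pyA_serverLoop, altScanServer_single]
        rw [if_neg (by simp)]
      | cons year rest' =>
        have e1 : pre ++ "Server" :: year :: rest' = (pre ++ ["Server"]) ++ year :: rest' := by simp
        have e2 : ((pre.length : Nat) : Int) + 1 = (((pre ++ ["Server"]).length : Nat) : Int) := by simp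
        rw [e1]
        simp only [pyA_serverLoop]
        rw [if_pos ⟨trivial, by simp⟩]
        rw [altScanServer.eq_1]
        rw [show ((pre.length : Nat) : Int) + 2 = (((pre ++ ["Server"]).length : Nat) : Int) + 1 by simp; ring]
        rw [e2, pyGetD_at_len, slice_after]
    · have hno : ¬ (p = "Server" ∧ ((pre.length : Nat) : Int) + 1 < (((pre ++ p :: rest).length : Nat) : Int)) := by
        intro h; exact hp h.1
      simp only [pyA_serverLoop, if_neg hno]
      rw [altScanServer_cons_ne p rest hp]
      rw [show ((pre.length : Nat) : Int) + 1 = (((pre ++ [p]).length : Nat) : Int) by simp,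
          show pre ++ p :: rest = (pre ++ [p]) ++ rest by simp]
      exact ih (pre ++ [p])

theorem clientLoop_eq (suf : List String) : ∀ (pre : List String),
    pyA_clientLoop (pre ++ suf) (PySem.List.enumerate suf ((pre.length : Nat) : Int)) = altScanClient suf := by
  induction suf with
  | nil => intro pre; simp [PySem.List.enumerate, pyA_clientLoop, altScanClient]
  | cons p rest ih =>
    intro pre
    rw [PySem.List.enumerate_cons]
    by_cases hp : p = "Windows"
    · subst hp
      cases rest with
      | nil =>
        rw [PySem.List.enumerate_nil]
        have hno : ¬ (("Windows" : String) = "Windows" ∧ ((pre.length : Nat) : Int) + 1 < (((pre ++ ["Windows"]).length : Nat) : Int)) := by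
          intro h
          have := h.2
          simp at this
        simp only [pyA_clientLoop, altScanClient_single]
        rw [if_neg (by simp)]
      | cons ver rest' =>
        have e1 : pre ++ "Windows" :: ver :: rest' = (pre ++ ["Windows"]) ++ ver :: rest' := by simp
        have e2 : ((pre.length : Nat) : Int) + 1 = (((pre ++ ["Windows"]).length : Nat) : Int) := by simp
        rw [e1]
        simp only [pyA_clientLoop]
        rw [if_pos ⟨trivial, by simp⟩]
        rw [show ((pre.length : Nat) : Int) + 2 = (((pre ++ ["Windows"]).length : Nat) : Int) + 1 by simp; ring]
        rw [e2, pyGetD_at_len, slice_after]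
        rw [altScanClient.eq_1]
        split_ifs with hv
        · rfl
        · exact ih (pre ++ ["Windows"])
    · have hno : ¬ (p = "Windows" ∧ ((pre.length : Nat) : Int) + 1 < (((pre ++ p :: rest).length : Nat) : Int)) := by
        intro h; exact hp h.1
      simp only [pyA_clientLoop, if_neg hno]
      rw [altScanClient_cons_ne p rest hp]
      rw [show ((pre.length : Nat) : Int) + 1 = (((pre ++ [p]).length : Nat) : Int) by simp,
          show pre ++ p :: rest = (pre ++ [p]) ++ rest by simp]
      exact ih (pre ++ [p])

-- ===== VERDICT (by name: the statement is the Claim_ definition above) =====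
theorem parse_caption_py_spec : Claim_equal_parse_caption_py := by
  intro caption _
  unfold Spec_parse_caption_py parse_caption_py parse_caption_py_alt
  dsimp only
  split_ifs with hA hB
  · have := serverLoop_eq (PySem.Str.split₀ (PySem.Str.strip (PySem.Str.replace caption "Microsoft " ""))) []
    simp only [List.nil_append, List.length_nil, Nat.cast_zero] at this
    rw [this]
    cases altScanServer (PySem.Str.split₀ (PySem.Str.strip (PySem.Str.replace caption "Microsoft " ""))) <;> rfl
  · have := clientLoop_eq (PySem.Str.split₀ (PySem.Str.strip (PySem.Str.replace caption "Microsoft " ""))) []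
    simp only [List.nil_append, List.length_nil, Nat.cast_zero] at this
    rw [this]
    cases altScanClient (PySem.Str.split₀ (PySem.Str.strip (PySem.Str.replace caption "Microsoft " ""))) <;> rfl
  · rfl
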